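-- pv_equiv track=rewrite | github.com/aLehav/olami-ml-media-bias | article_processing.py | replace_british_spelling
-- ===== SOURCE A (Python) =====
-- def replace_british_spelling(text):
--     # Dictionary mapping British spelling to American spelling
--     british_to_american = {
--         'favourite': 'favorite',
--         'flavour': 'flavor',
--         'colour': 'color',
--         'humour': 'humor',
--         'labour': 'labor',
--         'neighbour': 'neighbor',
--         'apologise': 'apologize',
--         'organise': 'organize',
--         'recognise': 'recognize',
--         'analyse': 'analyze',
--         'paralyse': "paralyze",
--         'travelled': 'travaled',
--         'manoeuvre': 'maneuver'
--
--         # Add more pairs as needed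
--     }
--     for british, american in british_to_american.items():
--         text = text.replace(british, american)
--     return text
-- ===== SOURCE B (Python) =====
-- def replace_british_spelling(text):
--     replacements = [
--         ('favourite', 'favorite'),
--         ('flavour', 'flavor'),
--         ('colour', 'color'),
--         ('humour', 'humor'),
--         ('labour', 'labor'),
--         ('neighbour', 'neighbor'),
--         ('apologise', 'apologize'),
--         ('organise', 'organize'),
--         ('recognise', 'recognize'),
--         ('analyse', 'analyze'),
--         ('paralyse', 'paralyze'),
--         ('travelled', 'travaled'),
--         ('manoeuvre', 'maneuver'),
--     ]
--
--     def substitute(s, pairs):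
--         if not pairs:
--             return s
--         british, american = pairs[0]
--         return substitute(american.join(s.split(british)), pairs[1:])
--
--     return substitute(text, replacements)
-- ===== Notes on version B (the rewrite author's own statement) =====
-- stated objective: alternative
-- what changed: A loops over a dict applying 13 str.replace passes; B recurses over the pair list and performs each substitution by splitting the text on the British word and joining the fragments with the American word (split/join instead of replace), maintaining a fragment list per pass.
import Mathlib
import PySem

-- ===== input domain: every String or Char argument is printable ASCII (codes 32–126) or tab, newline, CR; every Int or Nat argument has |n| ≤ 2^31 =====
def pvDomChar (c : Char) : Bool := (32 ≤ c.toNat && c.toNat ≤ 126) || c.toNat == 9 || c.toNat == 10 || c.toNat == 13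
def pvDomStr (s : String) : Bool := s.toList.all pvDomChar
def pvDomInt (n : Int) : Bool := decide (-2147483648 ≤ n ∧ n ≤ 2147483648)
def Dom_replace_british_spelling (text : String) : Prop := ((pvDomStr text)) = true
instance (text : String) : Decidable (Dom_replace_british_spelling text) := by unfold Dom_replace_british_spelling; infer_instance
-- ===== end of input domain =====

set_option maxHeartbeats 1000000


-- B performs each substitution by splitting on the British word and joining with the American
-- word (recursing over the word list) instead of A's dict loop of str.replace passes; equal always.

-- ===== PORT A =====
def replace_british_spelling (text : String) : String :=
  let british_to_american : PySem.Dict String String := PySem.Dict.ofList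
    [("favourite", "favorite"),
     ("flavour", "flavor"),
     ("colour", "color"),
     ("humour", "humor"),
     ("labour", "labor"),
     ("neighbour", "neighbor"),
     ("apologise", "apologize"),
     ("organise", "organize"),
     ("recognise", "recognize"),
     ("analyse", "analyze"),
     ("paralyse", "paralyze"),
     ("travelled", "travaled"),
     ("manoeuvre", "maneuver")]
  (PySem.Dict.items british_to_american).foldl
    (fun t p => PySem.Str.replace t p.1 p.2) text

-- ===== PORT B =====
-- the `replacements` list of Source B
def pvPairs : List (String × String) :=
  [("favourite", "favorite"),
   ("flavour", "flavor"),
   ("colour", "color"),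
   ("humour", "humor"),
   ("labour", "labor"),
   ("neighbour", "neighbor"),
   ("apologise", "apologize"),
   ("organise", "organize"),
   ("recognise", "recognize"),
   ("analyse", "analyze"),
   ("paralyse", "paralyze"),
   ("travelled", "travaled"),
   ("manoeuvre", "maneuver")]

-- Python's s.split(sep) for a non-empty separator: the list of fragments between
-- non-overlapping left-to-right occurrences of sep (the `sep ≠ []` guard only keeps
-- the recursion well-founded; all separators used are non-empty literals)
def pvSplit (sep : List Char) : List Char → List (List Char)
  | [] => [[]]
  | c :: t =>
    if sep.isPrefixOf (c :: t) ∧ sep ≠ [] then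
      [] :: pvSplit sep (t.drop (sep.length - 1))
    else
      match pvSplit sep t with
      | [] => [[c]]
      | f :: rest => (c :: f) :: rest
termination_by s => s.length
decreasing_by
  all_goals first
  | (simp [List.length_drop]; omega)
  | simp

-- Python's sep.join(parts)
def pvJoin (sep : List Char) : List (List Char) → List Char
  | [] => []
  | [f] => f
  | f :: g :: rest => f ++ sep ++ pvJoin sep (g :: rest)

-- the recursive `substitute` helper of Source B
def pvSubstitute : String → List (String × String) → String
  | s, [] => s
  | s, p :: rest =>
    pvSubstitute (String.ofList (pvJoin p.2.toList (pvSplit p.1.toList s.toList))) rest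

def replace_british_spelling_alt (text : String) : String :=
  pvSubstitute text pvPairs

-- ===== PRECONDITION & SPEC =====
def Spec_replace_british_spelling (text : String) (out : String) : Prop := out = replace_british_spelling_alt text
instance (text : String) (out : String) : Decidable (Spec_replace_british_spelling text out) := by unfold Spec_replace_british_spelling; infer_instance

-- ===== CLAIM (what is proved, stated in full; the proofs are below) =====
def Claim_equal_replace_british_spelling : Prop := ∀ (text : String), Dom_replace_british_spelling text → Spec_replace_british_spelling text (replace_british_spelling text)

-- ===== LEMMAS AND PROOFS =====

-- structural version of Python's str.replace (old ≠ []): replace at the first match, restart after it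
def pvRep (old new : List Char) : List Char → List Char
  | [] => []
  | c :: t =>
    if old.isPrefixOf (c :: t) ∧ old ≠ [] then new ++ pvRep old new (t.drop (old.length - 1))
    else c :: pvRep old new t
termination_by s => s.length
decreasing_by
  all_goals first
  | (simp [List.length_drop]; omega)
  | simp

theorem pvRep_nil (old new : List Char) : pvRep old new [] = [] := by simp [pvRep]

-- PySem.Chars.replace agrees with pvRep for a non-empty pattern
theorem pvGo_eq (old new : List Char) (hne : old ≠ []) :
    ∀ (fuel : Nat) (l acc : List Char), l.length ≤ fuel →
      PySem.Chars.replace.go old new fuel l acc = acc.reverse ++ pvRep old new l := by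
  intro fuel
  induction fuel with
  | zero =>
    intro l acc hl
    have : l = [] := by cases l <;> simp_all
    subst this
    simp [PySem.Chars.replace.go, pvRep_nil]
  | succ n ih =>
    intro l acc hl
    cases l with
    | nil => simp [PySem.Chars.replace.go, pvRep_nil]
    | cons c t =>
      rw [PySem.Chars.replace.go]
      by_cases hp : old.isPrefixOf (c :: t)
      · rw [if_pos hp]
        have hlen : 1 ≤ old.length := by cases old <;> simp_all
        have hdrop : (c :: t).drop old.length = t.drop (old.length - 1) := by
          cases old with
          | nil => simp_all
          | cons o os => simp
        rw [hdrop]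
        rw [ih _ _ (by simp [List.length_drop] at *; omega)]
        rw [pvRep]
        rw [if_pos ⟨hp, hne⟩]
        simp
      · rw [if_neg hp]
        rw [ih _ _ (by simp at hl ⊢; omega)]
        rw [pvRep]
        rw [if_neg (by simp [hp])]
        simp

theorem pvReplace_eq (s old new : List Char) (hne : old ≠ []) :
    PySem.Chars.replace s old new = pvRep old new s := by
  rw [PySem.Chars.replace]
  rw [if_neg (by simp [List.isEmpty_iff, hne])]
  simpa using pvGo_eq old new hne s.length s [] le_rfl

theorem pvStrRep (s o n : String) (h : o.toList ≠ []) :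
    PySem.Str.replace s o n = String.ofList (pvRep o.toList n.toList s.toList) := by
  unfold PySem.Str.replace
  rw [pvReplace_eq _ _ _ h]

-- splitting never produces the empty fragment list
theorem pvSplit_ne_nil (sep s : List Char) : pvSplit sep s ≠ [] := by
  cases s with
  | nil => simp [pvSplit]
  | cons c t =>
    rw [pvSplit]
    split
    · simp
    · cases h : pvSplit sep t <;> simp

theorem pvJoin_cons_nil (v : List Char) (rest : List (List Char)) (hr : rest ≠ []) :
    pvJoin v ([] :: rest) = v ++ pvJoin v rest := by
  cases rest with
  | nil => exact absurd rfl hr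
  | cons g rs => simp [pvJoin]

theorem pvJoin_cons_head (v f : List Char) (c : Char) (rest : List (List Char)) :
    pvJoin v ((c :: f) :: rest) = c :: pvJoin v (f :: rest) := by
  cases rest with
  | nil => simp [pvJoin]
  | cons g rs => simp [pvJoin]

-- the central fact: join-with-v of split-on-k is exactly str.replace k→v
theorem pvJoin_split (k v : List Char) (hk : k ≠ []) :
    ∀ (n : Nat) (s : List Char), s.length ≤ n → pvJoin v (pvSplit k s) = pvRep k v s := by
  intro n
  induction n with
  | zero =>
    intro s hs
    have : s = [] := by cases s <;> simp_all
    subst this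
    simp [pvSplit, pvJoin, pvRep_nil]
  | succ m ih =>
    intro s hs
    cases s with
    | nil => simp [pvSplit, pvJoin, pvRep_nil]
    | cons c t =>
      rw [pvSplit, pvRep]
      by_cases hp : k.isPrefixOf (c :: t)
      · rw [if_pos ⟨hp, hk⟩, if_pos ⟨hp, hk⟩]
        rw [pvJoin_cons_nil v (pvSplit k (t.drop (k.length - 1))) (pvSplit_ne_nil _ _)]
        rw [ih (t.drop (k.length - 1)) (by simp [List.length_drop] at *; omega)]
      · rw [if_neg (by simp [hp]), if_neg (by simp [hp])]
        rcases hsp : pvSplit k t with _ | ⟨f, rest⟩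
        · exact absurd hsp (pvSplit_ne_nil _ _)
        · rw [pvJoin_cons_head]
          rw [← hsp]
          rw [ih t (by simp at hs ⊢; omega)]

-- one substitution step of Source B equals one str.replace pass of A
theorem pvStep_eq (s : String) (p : String × String) (h : p.1.toList ≠ []) :
    PySem.Str.replace s p.1 p.2
      = String.ofList (pvJoin p.2.toList (pvSplit p.1.toList s.toList)) := by
  rw [pvStrRep _ _ _ h,
    pvJoin_split p.1.toList p.2.toList h s.toList.length s.toList le_rfl]

-- the fold of replace passes equals the recursion of split/join passes
theorem pvFold_eq_substitute (L : List (String × String)) :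
    (∀ p ∈ L, p.1.toList ≠ []) → ∀ (s : String),
      L.foldl (fun t p => PySem.Str.replace t p.1 p.2) s = pvSubstitute s L := by
  induction L with
  | nil => intro _ s; rfl
  | cons p L ihL =>
    intro h s
    rw [List.foldl_cons, pvSubstitute, ← pvStep_eq s p (h p List.mem_cons_self)]
    exact ihL (fun q hq => h q (List.mem_cons_of_mem _ hq)) _

-- ===== VERDICT (by name: the statement is the Claim_ definition above) =====
theorem replace_british_spelling_spec : Claim_equal_replace_british_spelling := by
  intro text _
  unfold Spec_replace_british_spelling replace_british_spelling_alt
  rw [show replace_british_spelling text = (PySem.Dict.items (PySem.Dict.ofList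
    [("favourite", "favorite"), ("flavour", "flavor"), ("colour", "color"),
     ("humour", "humor"), ("labour", "labor"), ("neighbour", "neighbor"),
     ("apologise", "apologize"), ("organise", "organize"), ("recognise", "recognize"),
     ("analyse", "analyze"), ("paralyse", "paralyze"), ("travelled", "travaled"),
     ("manoeuvre", "maneuver")])).foldl
      (fun t p => PySem.Str.replace t p.1 p.2) text from rfl]
  rw [show PySem.Dict.items (PySem.Dict.ofList
    [("favourite", "favorite"), ("flavour", "flavor"), ("colour", "color"),
     ("humour", "humor"), ("labour", "labor"), ("neighbour", "neighbor"),
     ("apologise", "apologize"), ("organise", "organize"), ("recognise", "recognize"),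
     ("analyse", "analyze"), ("paralyse", "paralyze"), ("travelled", "travaled"),
     ("manoeuvre", "maneuver")]) = pvPairs from by decide]
  exact pvFold_eq_substitute pvPairs (by decide) text
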